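-- pv_equiv track=rewrite | github.com/Ethan2k04/Crypto2024 | spn_attack/la.py | spn_encrypt
-- ===== SOURCE A (Python) =====
-- S_BOX = [14, 4, 13, 1, 2, 15, 11, 8, 3, 10, 6, 12, 5, 9, 0, 7]
--
-- P_BOX = [0, 4, 8, 12, 1, 5, 9, 13, 2, 6, 10, 14, 3, 7, 11, 15]
--
-- def round_function(input_block, key, i):
--     state = input_block ^ key
--     state = substitute(state)
--     state = permute(state)
--     return state
--
-- def substitute(block):
--     output = 0
--     for i in range(4):
--         nibble = (block >> (i * 4)) & 0xF
--         output |= S_BOX[nibble] << (i * 4)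
--     return output
--
-- def permute(block):
--     output = 0
--     for i in range(16):
--         bit = (block >> (15 - i)) & 1  # 获取从高位到低位的位
--         output |= bit << (15 - P_BOX[i])  # 根据 P_BOX 进行置换
--     return output
--
-- def spn_encrypt(plaintext, keys):
--     state = plaintext
--     for i in range(3):  # 前3轮
--         state = round_function(state, keys[i], i)
--     state ^= keys[-2]
--     state = substitute(state)  # 第4轮不进行P置换
--     state ^= keys[-1]  # 最后一轮（第5轮）只进行密钥加操作
--     return state
-- ===== SOURCE B (Python) =====
-- S_BOX = [14, 4, 13, 1, 2, 15, 11, 8, 3, 10, 6, 12, 5, 9, 0, 7]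
-- P_BOX = [0, 4, 8, 12, 1, 5, 9, 13, 2, 6, 10, 14, 3, 7, 11, 15]
--
-- def _permute(block):
--     # used only once, at table-build time
--     output = 0
--     for i in range(16):
--         bit = (block >> (15 - i)) & 1
--         output |= bit << (15 - P_BOX[i])
--     return output
--
-- # merged S-then-P lookup tables, one per nibble position (T-table technique):
-- # TABLE[i][n] = permute(S_BOX[n] << 4*i); permute is a bit permutation, hence
-- # OR-linear over the four disjoint nibble contributions, so a full round is
-- # just four table lookups ORed together.
-- TABLE = [[_permute(S_BOX[n] << (i * 4)) for n in range(16)] for i in range(4)]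
--
-- def spn_encrypt(plaintext, keys):
--     state = plaintext
--     for r in range(3):
--         state ^= keys[r]
--         state = (((TABLE[0][state & 0xF]
--                  | TABLE[1][(state >> 4) & 0xF])
--                  | TABLE[2][(state >> 8) & 0xF])
--                  | TABLE[3][(state >> 12) & 0xF])
--     state ^= keys[-2]
--     # round 4: S-box only, applied nibble-wise by direct indexing
--     state = (((S_BOX[state & 0xF]
--              | (S_BOX[(state >> 4) & 0xF] << 4))
--              | (S_BOX[(state >> 8) & 0xF] << 8))
--              | (S_BOX[(state >> 12) & 0xF] << 12))
--     return state ^ keys[-1]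
-- ===== Notes on version B (the rewrite author's own statement) =====
-- stated objective: alternative
-- what changed: Replaced the per-round substitute (4-nibble S-box loop) followed by permute (16-bit permutation loop) with precomputed merged S-then-P lookup tables (T-tables, TABLE[i][n] = permute(S_BOX[n] << 4*i)), so each full round is four table lookups ORed together, and the ends-only S-box round is done by direct nibble indexing; correct because permute is a bit permutation and hence OR-linear over the four disjoint nibble contributions.
import Mathlib
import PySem

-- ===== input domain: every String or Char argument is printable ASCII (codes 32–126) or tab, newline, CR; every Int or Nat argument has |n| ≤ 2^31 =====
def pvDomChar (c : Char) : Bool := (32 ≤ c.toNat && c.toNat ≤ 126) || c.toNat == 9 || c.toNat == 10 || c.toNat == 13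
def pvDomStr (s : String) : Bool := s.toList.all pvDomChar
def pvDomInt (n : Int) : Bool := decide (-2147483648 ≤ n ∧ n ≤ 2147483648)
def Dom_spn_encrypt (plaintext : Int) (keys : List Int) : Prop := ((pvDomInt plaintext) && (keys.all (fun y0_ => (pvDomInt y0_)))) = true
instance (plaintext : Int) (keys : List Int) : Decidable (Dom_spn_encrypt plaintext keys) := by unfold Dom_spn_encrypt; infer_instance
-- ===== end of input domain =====

-- B replaces A's per-round substitute (nibble S-box loop) + permute (bit loop) with
-- precomputed merged S-then-P lookup tables (T-tables): each full round becomes four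
-- table lookups ORed together, and the S-box-only round is direct nibble indexing
-- (objective: alternative).

def pvSBox : List Int := [14, 4, 13, 1, 2, 15, 11, 8, 3, 10, 6, 12, 5, 9, 0, 7]
def pvPBox : List Int := [0, 4, 8, 12, 1, 5, 9, 13, 2, 6, 10, 14, 3, 7, 11, 15]

-- ===== PORT A =====
def pvSubstitute (block : Int) : Int :=
  (PySem.List.pyRange 0 4 1).foldl (fun output i =>
    let nibble := PySem.Int.band (block >>> (i * 4).toNat) 15
    PySem.Int.bor output ((PySem.List.pyGetD pvSBox nibble 0) <<< (i * 4).toNat)) 0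

def pvPermute (block : Int) : Int :=
  (PySem.List.pyRange 0 16 1).foldl (fun output i =>
    let bit := PySem.Int.band (block >>> (15 - i).toNat) 1
    PySem.Int.bor output (bit <<< (15 - PySem.List.pyGetD pvPBox i 0).toNat)) 0

def pvRoundFunction (input_block : Int) (key : Int) (_i : Int) : Int :=
  pvPermute (pvSubstitute (PySem.Int.bxor input_block key))

def spn_encrypt (plaintext : Int) (keys : List Int) : Int :=
  let state := (PySem.List.pyRange 0 3 1).foldl
    (fun st i => pvRoundFunction st (PySem.List.pyGetD keys i 0) i) plaintext
  let state := PySem.Int.bxor state (PySem.List.pyGetD keys (-2) 0)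
  let state := pvSubstitute state
  PySem.Int.bxor state (PySem.List.pyGetD keys (-1) 0)

-- ===== PORT B =====
-- B's table-build-time permute helper (_permute in Source B)
def pvPermuteB (block : Int) : Int :=
  (PySem.List.pyRange 0 16 1).foldl (fun output i =>
    let bit := PySem.Int.band (block >>> (15 - i).toNat) 1
    PySem.Int.bor output (bit <<< (15 - PySem.List.pyGetD pvPBox i 0).toNat)) 0

-- TABLE = [[_permute(S_BOX[n] << (i * 4)) for n in range(16)] for i in range(4)]
def pvTable : List (List Int) :=
  (PySem.List.pyRange 0 4 1).map (fun i =>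
    (PySem.List.pyRange 0 16 1).map (fun n =>
      pvPermuteB ((PySem.List.pyGetD pvSBox n 0) <<< (i * 4).toNat)))

def pvTblRound (state : Int) : Int :=
  PySem.Int.bor (PySem.Int.bor (PySem.Int.bor
    (PySem.List.pyGetD (PySem.List.pyGetD pvTable 0 []) (PySem.Int.band state 15) 0)
    (PySem.List.pyGetD (PySem.List.pyGetD pvTable 1 []) (PySem.Int.band (state >>> 4) 15) 0))
    (PySem.List.pyGetD (PySem.List.pyGetD pvTable 2 []) (PySem.Int.band (state >>> 8) 15) 0))
    (PySem.List.pyGetD (PySem.List.pyGetD pvTable 3 []) (PySem.Int.band (state >>> 12) 15) 0)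

def pvSubRound (state : Int) : Int :=
  PySem.Int.bor (PySem.Int.bor (PySem.Int.bor
    (PySem.List.pyGetD pvSBox (PySem.Int.band state 15) 0)
    ((PySem.List.pyGetD pvSBox (PySem.Int.band (state >>> 4) 15) 0) <<< 4))
    ((PySem.List.pyGetD pvSBox (PySem.Int.band (state >>> 8) 15) 0) <<< 8))
    ((PySem.List.pyGetD pvSBox (PySem.Int.band (state >>> 12) 15) 0) <<< 12)

def spn_encrypt_alt (plaintext : Int) (keys : List Int) : Int :=
  let state := (PySem.List.pyRange 0 3 1).foldl
    (fun st r => pvTblRound (PySem.Int.bxor st (PySem.List.pyGetD keys r 0))) plaintext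
  let state := PySem.Int.bxor state (PySem.List.pyGetD keys (-2) 0)
  let state := pvSubRound state
  PySem.Int.bxor state (PySem.List.pyGetD keys (-1) 0)

-- ===== PRECONDITION & SPEC =====
-- Pre_ excludes exactly the inputs where A raises IndexError (keys[2] and keys[-2] need len(keys) >= 3).
def Pre_spn_encrypt (_plaintext : Int) (keys : List Int) : Prop := 3 ≤ keys.length
instance (plaintext : Int) (keys : List Int) : Decidable (Pre_spn_encrypt plaintext keys) := by
  unfold Pre_spn_encrypt; infer_instance

def pvWitness_spn_encrypt : Int × List Int := (1234, [11, 22, 33, 44, 55])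

def Spec_spn_encrypt (plaintext : Int) (keys : List Int) (out : Int) : Prop := out = spn_encrypt_alt plaintext keys
instance (plaintext : Int) (keys : List Int) (out : Int) : Decidable (Spec_spn_encrypt plaintext keys out) := by unfold Spec_spn_encrypt; infer_instance

-- ===== CLAIM (what is proved, stated in full; the proofs are below) =====
def Claim_equal_spn_encrypt : Prop := ∀ (plaintext : Int) (keys : List Int), Dom_spn_encrypt plaintext keys → Pre_spn_encrypt plaintext keys → Spec_spn_encrypt plaintext keys (spn_encrypt plaintext keys)

-- ===== LEMMAS AND PROOFS =====

theorem pvZeroBor (a : Int) : PySem.Int.bor 0 a = a := by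
  rw [PySem.Int.bor_comm]; exact PySem.Int.bor_zero a

-- A's substitute loop, unrolled, is exactly B's inline S-box round
theorem subst_decomp (s : Int) : pvSubstitute s = pvSubRound s := by
  simp only [pvSubstitute, pvSubRound, show PySem.List.pyRange 0 4 1 = [0,1,2,3] by decide,
    List.foldl, pvZeroBor]
  norm_num
  simp only [show (0:Int) = ((0:Nat):Int) from by norm_num]
  simp only [Int.shiftRight_natCast_right, Int.shiftLeft_natCast_right]
  simp

theorem band15_bounds (a : Int) : 0 ≤ PySem.Int.band a 15 ∧ PySem.Int.band a 15 ≤ 15 := by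
  unfold PySem.Int.band
  split_ifs with h1 h2 h2
  · have h := Nat.and_le_right (n := a.toNat) (m := (15:Int).toNat)
    have h15 : (15:Int).toNat = 15 := rfl
    omega
  · omega
  · have h := Nat.sub_le ((15:Int).toNat) ((15:Int).toNat &&& (-a - 1).toNat)
    have h15 : (15:Int).toNat = 15 := rfl
    omega
  · omega

theorem sbox_range (v : Int) (h0 : 0 ≤ v) (h15 : v ≤ 15) :
    0 ≤ PySem.List.pyGetD pvSBox v 0 ∧ PySem.List.pyGetD pvSBox v 0 ≤ 15 := by
  interval_cases v <;> decide

theorem shl_nonneg (x : Int) (h : 0 ≤ x) (k : Int) (hk : 0 ≤ k) : 0 ≤ x <<< k := by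
  obtain ⟨n, rfl⟩ : ∃ n : Nat, x = (n : Int) := ⟨x.toNat, (Int.toNat_of_nonneg h).symm⟩
  obtain ⟨m, rfl⟩ : ∃ m : Nat, k = (m : Int) := ⟨k.toNat, (Int.toNat_of_nonneg hk).symm⟩
  rw [Int.shiftLeft_natCast]
  exact Int.natCast_nonneg _

theorem bor_nonneg (a b : Int) (ha : 0 ≤ a) (hb : 0 ≤ b) : 0 ≤ PySem.Int.bor a b := by
  rw [PySem.Int.bor_of_nonneg ha hb]
  exact Int.natCast_nonneg _

-- permute is a bit permutation, hence OR-linear on nonnegative inputs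
theorem atomCast (z : Nat) (k m : Nat) :
    (PySem.Int.band ((z:Int) >>> ((k:Nat):Int)) 1) <<< m = ((((z >>> k) &&& 1) <<< m : Nat) : Int) := by
  rw [Int.shiftRight_natCast,
    PySem.Int.band_of_nonneg (Int.natCast_nonneg _) (by norm_num : (0:Int) ≤ 1)]
  simp only [Int.toNat_natCast, Int.toNat_one, Int.natCast_shiftLeft]

def pfoldc (z : Nat) (l : List Int) (a : Nat) : Int :=
  l.foldl (fun o i => PySem.Int.bor o
    (((((z >>> (15-i).toNat) &&& 1) <<< (15 - PySem.List.pyGetD pvPBox i 0).toNat : Nat)) : Int)) (a : Int)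

theorem pfoldc_lor (x y : Nat) (l : List Int) : ∀ a b : Nat,
    pfoldc (x ||| y) l (a ||| b) = PySem.Int.bor (pfoldc x l a) (pfoldc y l b) := by
  induction l with
  | nil => intro a b; simp [pfoldc, PySem.Int.bor_natCast]
  | cons i l ih =>
    intro a b
    simp only [pfoldc, List.foldl_cons, PySem.Int.bor_natCast] at ih ⊢
    rw [show (a ||| b) ||| ((x ||| y) >>> (15 - i).toNat &&& 1) <<< (15 - PySem.List.pyGetD pvPBox i 0).toNat
        = (a ||| (x >>> (15 - i).toNat &&& 1) <<< (15 - PySem.List.pyGetD pvPBox i 0).toNat)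
          ||| (b ||| (y >>> (15 - i).toNat &&& 1) <<< (15 - PySem.List.pyGetD pvPBox i 0).toNat) by
      rw [Nat.shiftRight_or_distrib, Nat.and_or_distrib_right, Nat.shiftLeft_or_distrib]
      rw [Nat.or_assoc, Nat.or_assoc, ← Nat.or_assoc b,
        Nat.or_comm b _, Nat.or_assoc _ b]]
    exact ih _ _

theorem perm_cast (z : Nat) : pvPermute (z : Int) = pfoldc z (PySem.List.pyRange 0 16 1) 0 := by
  unfold pvPermute pfoldc
  simp only [atomCast, Nat.cast_zero]

theorem permute_bor (a b : Int) (ha : 0 ≤ a) (hb : 0 ≤ b) :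
    pvPermute (PySem.Int.bor a b) = PySem.Int.bor (pvPermute a) (pvPermute b) := by
  obtain ⟨x, rfl⟩ : ∃ x : Nat, a = (x : Int) := ⟨a.toNat, (Int.toNat_of_nonneg ha).symm⟩
  obtain ⟨y, rfl⟩ : ∃ y : Nat, b = (y : Int) := ⟨b.toNat, (Int.toNat_of_nonneg hb).symm⟩
  rw [PySem.Int.bor_natCast, perm_cast, perm_cast, perm_cast,
    show (0:Nat) = (0 ||| 0 : Nat) from rfl, pfoldc_lor]
  simp

-- the merged tables agree with permute-after-S-box, nibble by nibble
theorem tbl0 (v : Int) (h0 : 0 ≤ v) (h15 : v ≤ 15) :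
    PySem.List.pyGetD (PySem.List.pyGetD pvTable 0 []) v 0
      = pvPermute (PySem.List.pyGetD pvSBox v 0) := by
  interval_cases v <;> decide

theorem tbl1 (v : Int) (h0 : 0 ≤ v) (h15 : v ≤ 15) :
    PySem.List.pyGetD (PySem.List.pyGetD pvTable 1 []) v 0
      = pvPermute ((PySem.List.pyGetD pvSBox v 0) <<< 4) := by
  interval_cases v <;> decide

theorem tbl2 (v : Int) (h0 : 0 ≤ v) (h15 : v ≤ 15) :
    PySem.List.pyGetD (PySem.List.pyGetD pvTable 2 []) v 0
      = pvPermute ((PySem.List.pyGetD pvSBox v 0) <<< 8) := by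
  interval_cases v <;> decide

theorem tbl3 (v : Int) (h0 : 0 ≤ v) (h15 : v ≤ 15) :
    PySem.List.pyGetD (PySem.List.pyGetD pvTable 3 []) v 0
      = pvPermute ((PySem.List.pyGetD pvSBox v 0) <<< 12) := by
  interval_cases v <;> decide

theorem pvRound_eq (s : Int) : pvTblRound s = pvPermute (pvSubstitute s) := by
  rw [subst_decomp]
  unfold pvSubRound pvTblRound
  obtain ⟨hn0, hn0'⟩ := band15_bounds s
  obtain ⟨hn1, hn1'⟩ := band15_bounds (s >>> 4)
  obtain ⟨hn2, hn2'⟩ := band15_bounds (s >>> 8)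
  obtain ⟨hn3, hn3'⟩ := band15_bounds (s >>> 12)
  obtain ⟨hs0, _⟩ := sbox_range _ hn0 hn0'
  obtain ⟨hs1, _⟩ := sbox_range _ hn1 hn1'
  obtain ⟨hs2, _⟩ := sbox_range _ hn2 hn2'
  obtain ⟨hs3, _⟩ := sbox_range _ hn3 hn3'
  have ht1 := shl_nonneg _ hs1 4 (by norm_num)
  have ht2 := shl_nonneg _ hs2 8 (by norm_num)
  have ht3 := shl_nonneg _ hs3 12 (by norm_num)
  rw [permute_bor _ _ (bor_nonneg _ _ (bor_nonneg _ _ hs0 ht1) ht2) ht3,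
    permute_bor _ _ (bor_nonneg _ _ hs0 ht1) ht2,
    permute_bor _ _ hs0 ht1,
    tbl0 _ hn0 hn0', tbl1 _ hn1 hn1', tbl2 _ hn2 hn2', tbl3 _ hn3 hn3']

-- ===== VERDICT (by name: the statement is the Claim_ definition above) =====
theorem spn_encrypt_spec : Claim_equal_spn_encrypt := by
  intro p keys _ _
  show spn_encrypt p keys = spn_encrypt_alt p keys
  simp only [spn_encrypt, spn_encrypt_alt, show PySem.List.pyRange 0 3 1 = [0,1,2] by decide,
    List.foldl, pvRoundFunction, pvRound_eq, subst_decomp]
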